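-- pv_equiv track=rewrite | github.com/ruben210698/Project_TFM_v2 | src/visualizacion/generator_graph.py | reducir_posiciones_finales_eje_y
-- ===== SOURCE A (Python) =====
-- def loop_reducir_posiciones_finales_eje_y(posiciones_finales, cambiado):
--     ultima_y_leida = 0
--     dim_y_reducir = 0
--     i = -1
--     posiciones_finales_loop = posiciones_finales.copy()
--     cambiado = False
--     for palabra, posicion in posiciones_finales_loop.items():
--         i += 1
--         pos_y_actual = posicion[1]
--         if (pos_y_actual - ultima_y_leida) > 15: # asi, si hay diferencia de 15, se quita antes la de 15
--             dim_y_reducir += (pos_y_actual - ultima_y_leida - 15)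
--         elif (pos_y_actual - ultima_y_leida) > 10:
--             dim_y_reducir += (pos_y_actual - ultima_y_leida - 10)
--         if dim_y_reducir > 0:
--             nueva_pos_y = pos_y_actual - dim_y_reducir
--             posiciones_finales.update({palabra: (posicion[0], nueva_pos_y)})
--             cambiado = True
--         ultima_y_leida = pos_y_actual
--     return posiciones_finales, cambiado
--
-- def reducir_posiciones_finales_eje_y(posiciones_finales):
--     posiciones_finales = posiciones_finales.copy()
--     # Lo que hace esta funcion es
--     # 1. ordena de menor a mayor todos los elementos y
--     # 2. mira si entre 1 y otro de alguno hay más de 10 elementos (recurda que están ordenados de menor a mayor)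
--     # 3. si existe, cojo las posiciones finales iniciales y reduzco esa diferencia "excesiva" a todas las ys
--     #  de todos los elementos que estén por encima de ese numero :)
--
--     # tengo que crear un diccionario de {palabra: {pos_x: pos_y}}
--     # y que ordene por pos_y en orden.
--
--     posiciones_finales = dict(sorted(posiciones_finales.items(), key=lambda x: x[1][1]))
--
--     cambiado = False
--     posiciones_finales, cambiado = loop_reducir_posiciones_finales_eje_y(posiciones_finales, cambiado)
--
--     while cambiado == True:
--         posiciones_finales, cambiado = loop_reducir_posiciones_finales_eje_y(posiciones_finales, cambiado)
--
--     return posiciones_finales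
-- ===== SOURCE B (Python) =====
-- def reducir_posiciones_finales_eje_y(posiciones_finales):
--     # single sweep: each consecutive y-gap (starting from 0) is capped at 10
--     prev_orig = 0
--     prev_new = 0
--     resultado = {}
--     for palabra, (pos_x, pos_y) in sorted(posiciones_finales.items(), key=lambda it: it[1][1]):
--         gap = pos_y - prev_orig
--         prev_new += gap if gap <= 10 else 10
--         resultado[palabra] = (pos_x, prev_new)
--         prev_orig = pos_y
--     return resultado
-- ===== Notes on version B (the rewrite author's own statement) =====
-- stated objective: simpler
-- what changed: A repeatedly re-runs a whole capping pass over the dict until a fixed point is reached; B sorts once and computes the fixed point directly in a single left-to-right sweep (new_y = prev_new + min(y - prev_orig, 10)).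
import Mathlib
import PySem

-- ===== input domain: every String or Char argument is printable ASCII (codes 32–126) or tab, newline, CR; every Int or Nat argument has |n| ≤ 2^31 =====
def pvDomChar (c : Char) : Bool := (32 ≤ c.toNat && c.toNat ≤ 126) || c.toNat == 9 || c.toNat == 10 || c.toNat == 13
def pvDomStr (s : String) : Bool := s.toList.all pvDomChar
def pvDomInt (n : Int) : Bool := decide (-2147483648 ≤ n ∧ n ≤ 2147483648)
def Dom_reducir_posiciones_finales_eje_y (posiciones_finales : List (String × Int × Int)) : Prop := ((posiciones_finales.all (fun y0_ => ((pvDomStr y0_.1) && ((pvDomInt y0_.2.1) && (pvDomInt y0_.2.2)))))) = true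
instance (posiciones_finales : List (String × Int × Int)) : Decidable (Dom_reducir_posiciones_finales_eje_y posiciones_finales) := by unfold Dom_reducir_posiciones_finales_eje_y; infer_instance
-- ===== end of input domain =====

-- B replaces A's repeated capping passes (looped until a fixed point) by one sort plus a single
-- left-to-right sweep that computes the fixed point directly: simpler, one pass.


-- ===== PORT A =====
-- dict.update({palabra: (x, y')}): overwrite in place, keeping the key's position; exact here
-- because the key always comes from the dict's own items (and keys are distinct under Pre_).
def pvUpd (d : List (String × Int × Int)) (k : String) (v : Int × Int) :
    List (String × Int × Int) :=
  d.map (fun p => if p.1 = k then (k, v.1, v.2) else p)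

-- one iteration of the 'for palabra, posicion in posiciones_finales_loop.items()' body;
-- state = (posiciones_finales, ultima_y_leida, dim_y_reducir, cambiado)
def pvStep (st : List (String × Int × Int) × Int × Int × Bool) (it : String × Int × Int) :
    List (String × Int × Int) × Int × Int × Bool :=
  let dim' := if it.2.2 - st.2.1 > 15 then st.2.2.1 + (it.2.2 - st.2.1 - 15)
    else if it.2.2 - st.2.1 > 10 then st.2.2.1 + (it.2.2 - st.2.1 - 10) else st.2.2.1
  if dim' > 0 then (pvUpd st.1 it.1 (it.2.1, it.2.2 - dim'), it.2.2, dim', true)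
  else (st.1, it.2.2, dim', st.2.2.2)

-- loop_reducir_posiciones_finales_eje_y: iterates over a copy of the items, updates the dict
def pvLoop (pf : List (String × Int × Int)) : List (String × Int × Int) × Bool :=
  let st := pf.foldl pvStep (pf, (0 : Int), (0 : Int), false)
  (st.1, st.2.2.2)

-- 'while cambiado == True': fuel only guards totality (under Pre_ at most two further passes
-- happen, proved below, so the 0-fuel branch is never reached there)
def pvWhile : Nat → List (String × Int × Int) → Bool → List (String × Int × Int)
  | _, pf, false => pf
  | 0, pf, true => pf
  | n+1, pf, true => let r := pvLoop pf; pvWhile n r.1 r.2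

def reducir_posiciones_finales_eje_y (posiciones_finales : List (String × Int × Int)) :
    List (String × Int × Int) :=
  let pf := PySem.List.sorted posiciones_finales (fun it => it.2.2) false
  let r := pvLoop pf
  pvWhile (posiciones_finales.length + 2) r.1 r.2

-- ===== PORT B =====
def pvSweep (prevO prevN : Int) : List (String × Int × Int) → List (String × Int × Int)
  | [] => []
  | (w, x, y) :: t =>
    let gap := y - prevO
    let prevN' := prevN + (if gap ≤ 10 then gap else 10)
    (w, x, prevN') :: pvSweep y prevN' t

def reducir_posiciones_finales_eje_y_alt (posiciones_finales : List (String × Int × Int)) :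
    List (String × Int × Int) :=
  pvSweep 0 0 (PySem.List.sorted posiciones_finales (fun it => it.2.2) false)

-- ===== PRECONDITION & SPEC =====
-- Pre_ excludes association lists with duplicate keys: they do not represent a Python dict
-- (A's parameter is a dict, which collapses duplicates before A even runs).
def Pre_reducir_posiciones_finales_eje_y (posiciones_finales : List (String × Int × Int)) : Prop :=
  (posiciones_finales.map Prod.fst).Nodup
instance (posiciones_finales : List (String × Int × Int)) : Decidable (Pre_reducir_posiciones_finales_eje_y posiciones_finales) := by unfold Pre_reducir_posiciones_finales_eje_y; infer_instance

def pvWitness_reducir_posiciones_finales_eje_y : (List (String × Int × Int)) :=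
  [("a", (0, 5)), ("b", (3, 40))]

def Spec_reducir_posiciones_finales_eje_y (posiciones_finales : List (String × Int × Int)) (out : List (String × Int × Int)) : Prop := out = reducir_posiciones_finales_eje_y_alt posiciones_finales
instance (posiciones_finales : List (String × Int × Int)) (out : List (String × Int × Int)) : Decidable (Spec_reducir_posiciones_finales_eje_y posiciones_finales out) := by unfold Spec_reducir_posiciones_finales_eje_y; infer_instance

-- ===== CLAIM (what is proved, stated in full; the proofs are below) =====
def Claim_equal_reducir_posiciones_finales_eje_y : Prop := ∀ (posiciones_finales : List (String × Int × Int)), Dom_reducir_posiciones_finales_eje_y posiciones_finales → Pre_reducir_posiciones_finales_eje_y posiciones_finales → Spec_reducir_posiciones_finales_eje_y posiciones_finales (reducir_posiciones_finales_eje_y posiciones_finales)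

-- ===== LEMMAS AND PROOFS =====

-- the dim_y_reducir update of one loop-body iteration
def pvExc (prev dim y : Int) : Int :=
  if y - prev > 15 then dim + (y - prev - 15)
  else if y - prev > 10 then dim + (y - prev - 10) else dim

-- recursive characterisation of one pass of A's loop on the items list (keys distinct):
-- returns (new items, ultima_y_leida, dim_y_reducir, cambiado)
def pvPass (prev dim : Int) (c : Bool) :
    List (String × Int × Int) → List (String × Int × Int) × Int × Int × Bool
  | [] => ([], prev, dim, c)
  | (w, x, y) :: t =>
    ((w, x, if pvExc prev dim y > 0 then y - pvExc prev dim y else y) ::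
        (pvPass y (pvExc prev dim y) (c || decide (pvExc prev dim y > 0)) t).1,
      (pvPass y (pvExc prev dim y) (c || decide (pvExc prev dim y > 0)) t).2)

theorem pvExc_nonneg (prev dim y : Int) (h : 0 ≤ dim) : 0 ≤ pvExc prev dim y := by
  unfold pvExc; split_ifs <;> omega

theorem pvUpd_not_mem (l : List (String × Int × Int)) (k : String) (v : Int × Int)
    (h : k ∉ l.map Prod.fst) : pvUpd l k v = l := by
  induction l with
  | nil => rfl
  | cons a t ih =>
    simp only [List.map_cons, List.mem_cons, not_or] at h
    unfold pvUpd
    rw [List.map_cons, if_neg (fun e => h.1 e.symm)]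
    exact congrArg (a :: ·) (ih h.2)

theorem pvUpd_append_cons (pre t : List (String × Int × Int)) (k : String) (a b : Int)
    (v : Int × Int) (hp : k ∉ pre.map Prod.fst) (ht : k ∉ t.map Prod.fst) :
    pvUpd (pre ++ (k, a, b) :: t) k v = pre ++ (k, v.1, v.2) :: t := by
  unfold pvUpd
  rw [List.map_append, List.map_cons, if_pos rfl]
  have h1 : pvUpd pre k v = pre := pvUpd_not_mem pre k v hp
  have h2 : pvUpd t k v = t := pvUpd_not_mem t k v ht
  unfold pvUpd at h1 h2
  rw [h1, h2]

theorem foldl_pvStep (its pre : List (String × Int × Int)) (prev dim : Int) (c : Bool)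
    (hd : ∀ k ∈ its.map Prod.fst, k ∉ pre.map Prod.fst) (hn : (its.map Prod.fst).Nodup) :
    its.foldl pvStep (pre ++ its, prev, dim, c) =
      (pre ++ (pvPass prev dim c its).1, (pvPass prev dim c its).2) := by
  revert hd hn
  induction its generalizing pre prev dim c with
  | nil => intro _ _; simp [pvPass]
  | cons a t ih =>
    intro hd hn
    obtain ⟨w, x, y⟩ := a
    simp only [List.map_cons, List.nodup_cons] at hn
    have hw_pre : w ∉ pre.map Prod.fst := hd w (by simp)
    have ht_pre : ∀ k ∈ t.map Prod.fst, k ∉ pre.map Prod.fst := fun k hk => hd k (by simp [hk])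
    rw [List.foldl_cons]
    simp only [pvStep]
    have hfold : (if (w, x, y).2.2 - (pre ++ (w, x, y) :: t, prev, dim, c).2.1 > 15 then
          (pre ++ (w, x, y) :: t, prev, dim, c).2.2.1 + ((w, x, y).2.2 - (pre ++ (w, x, y) :: t, prev, dim, c).2.1 - 15)
        else if (w, x, y).2.2 - (pre ++ (w, x, y) :: t, prev, dim, c).2.1 > 10 then
          (pre ++ (w, x, y) :: t, prev, dim, c).2.2.1 + ((w, x, y).2.2 - (pre ++ (w, x, y) :: t, prev, dim, c).2.1 - 10)
        else (pre ++ (w, x, y) :: t, prev, dim, c).2.2.1) = pvExc prev dim y := rfl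
    rw [hfold]
    by_cases hpos : pvExc prev dim y > 0
    · rw [if_pos hpos]
      have hupd : pvUpd (pre ++ (w, x, y) :: t, prev, dim, c).1 (w, x, y).1
          ((w, x, y).2.1, (w, x, y).2.2 - pvExc prev dim y) =
          (pre ++ [(w, x, y - pvExc prev dim y)]) ++ t := by
        rw [pvUpd_append_cons pre t w x y _ hw_pre hn.1]; simp
      rw [hupd, ih _ _ _ _ (by intro k hk; simp [ht_pre k hk]; rintro rfl; exact hn.1 hk) hn.2]
      simp [pvPass, hpos, List.append_assoc]
    · rw [if_neg hpos]
      rw [show pre ++ (w, x, y) :: t = (pre ++ [(w, x, y)]) ++ t from by simp,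
        ih _ _ _ _ (by intro k hk; simp [ht_pre k hk]; rintro rfl; exact hn.1 hk) hn.2]
      simp [pvPass, hpos, List.append_assoc]

theorem pvLoop_eq (l : List (String × Int × Int)) (hn : (l.map Prod.fst).Nodup) :
    pvLoop l = ((pvPass 0 0 false l).1, (pvPass 0 0 false l).2.2.2) := by
  have h := foldl_pvStep l [] 0 0 false (by simp) hn
  simp only [List.nil_append] at h
  simp [pvLoop, h]

theorem pvPass_keys (l : List (String × Int × Int)) (prev dim : Int) (c : Bool) :
    ((pvPass prev dim c l).1).map Prod.fst = l.map Prod.fst := by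
  induction l generalizing prev dim c with
  | nil => rfl
  | cons a t ih => obtain ⟨w, x, y⟩ := a; simp [pvPass, ih]

theorem pvSweep_keys (l : List (String × Int × Int)) (pO pN : Int) :
    (pvSweep pO pN l).map Prod.fst = l.map Prod.fst := by
  induction l generalizing pO pN with
  | nil => rfl
  | cons a t ih => obtain ⟨w, x, y⟩ := a; simp [pvSweep, ih]

theorem pvPass_flag_mono (l : List (String × Int × Int)) (prev dim : Int) :
    (pvPass prev dim true l).2.2.2 = true := by
  induction l generalizing prev dim with
  | nil => rfl
  | cons a t ih => obtain ⟨w, x, y⟩ := a; simpa [pvPass] using ih _ _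

-- a pass that reports no change left the list alone, and the sweep also leaves it alone
theorem pvPass_flag_false (l : List (String × Int × Int)) (prev dim : Int) (c : Bool)
    (hd : 0 ≤ dim) (h : (pvPass prev dim c l).2.2.2 = false) :
    (pvPass prev dim c l).1 = l ∧ pvSweep prev (prev - dim) l = l := by
  induction l generalizing prev dim c with
  | nil => exact ⟨rfl, rfl⟩
  | cons a t ih =>
    obtain ⟨w, x, y⟩ := a
    simp only [pvPass] at h ⊢
    have hcf : (c || decide (pvExc prev dim y > 0)) = false := by
      cases hcb : (c || decide (pvExc prev dim y > 0)) with
      | false => rfl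
      | true => rw [hcb, pvPass_flag_mono] at h; simp at h
    simp only [Bool.or_eq_false_iff, decide_eq_false_iff_not] at hcf
    have he : pvExc prev dim y = 0 ∧ dim = 0 ∧ y - prev ≤ 10 := by
      have h2 := hcf.2
      unfold pvExc at h2 ⊢
      split_ifs at h2 ⊢ <;> omega
    rw [hcf.1, he.1] at h
    have ht := ih y 0 false le_rfl (by simpa using h)
    constructor
    · rw [he.1]
      simp only [gt_iff_lt, lt_self_iff_false, if_false]
      rw [hcf.1]
      simpa [he.1] using ht.1
    · simp only [pvSweep]
      rw [if_pos he.2.2, show prev - dim + (y - prev) = y by omega]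
      have := ht.2
      rw [sub_zero] at this
      rw [this]

-- two consecutive passes compute exactly B's sweep
theorem pvPass_pass (l : List (String × Int × Int)) (p d1 d2 : Int) (c1 c2 : Bool)
    (h1 : 0 ≤ d1) (h2 : 0 ≤ d2) :
    (pvPass (p - d1) d2 c2 (pvPass p d1 c1 l).1).1 = pvSweep p (p - d1 - d2) l := by
  induction l generalizing p d1 d2 c1 c2 with
  | nil => simp [pvPass, pvSweep]
  | cons a t ih =>
    obtain ⟨w, x, y⟩ := a
    simp only [pvPass]
    set e1 := pvExc p d1 y with he1d
    have he1 : 0 ≤ e1 := pvExc_nonneg _ _ _ h1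
    have hy1 : (if e1 > 0 then y - e1 else y) = y - e1 := by split_ifs <;> omega
    rw [hy1]
    set e2 := pvExc (p - d1) d2 (y - e1) with he2d
    have he2 : 0 ≤ e2 := pvExc_nonneg _ _ _ h2
    have hy2 : (if e2 > 0 then y - e1 - e2 else y - e1) = y - e1 - e2 := by split_ifs <;> omega
    rw [hy2]
    simp only [pvSweep]
    have key : y - e1 - e2 = p - d1 - d2 + (if y - p ≤ 10 then y - p else 10) := by
      rw [he2d, he1d]
      unfold pvExc
      split_ifs <;> omega
    have htail := ih y e1 e2 (c1 || decide (e1 > 0)) (c2 || decide (e2 > 0)) he1 he2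
    rw [key] at htail
    rw [key, htail]

-- the sweep is a fixed point of the pass, and the pass reports no change on it
theorem pvPass_sweep_fix (l : List (String × Int × Int)) (pO pN : Int) (c : Bool) :
    (pvPass pN 0 c (pvSweep pO pN l)).1 = pvSweep pO pN l ∧
      (pvPass pN 0 c (pvSweep pO pN l)).2.2.1 = 0 ∧
      (pvPass pN 0 c (pvSweep pO pN l)).2.2.2 = c := by
  induction l generalizing pO pN c with
  | nil => exact ⟨rfl, rfl, rfl⟩
  | cons a t ih =>
    obtain ⟨w, x, y⟩ := a
    simp only [pvSweep, pvPass]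
    have hexc : pvExc pN 0 (pN + (if y - pO ≤ 10 then y - pO else 10)) = 0 := by
      unfold pvExc; split_ifs <;> omega
    rw [hexc]
    have hih := ih y (pN + (if y - pO ≤ 10 then y - pO else 10)) c
    simp only [gt_iff_lt, lt_self_iff_false, if_false, decide_false, Bool.or_false]
    exact ⟨by rw [hih.1], hih.2.1, hih.2.2⟩

theorem pvWhile_false (n : Nat) (pf : List (String × Int × Int)) :
    pvWhile n pf false = pf := by
  cases n <;> rfl

-- ===== VERDICT (by name: the statement is the Claim_ definition above) =====
theorem reducir_posiciones_finales_eje_y_spec : Claim_equal_reducir_posiciones_finales_eje_y := by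
  intro l _ hpre
  unfold Spec_reducir_posiciones_finales_eje_y
  show reducir_posiciones_finales_eje_y l = reducir_posiciones_finales_eje_y_alt l
  unfold reducir_posiciones_finales_eje_y reducir_posiciones_finales_eje_y_alt
  show pvWhile (l.length + 2) (pvLoop (PySem.List.sorted l (fun it => it.2.2) false)).1
      (pvLoop (PySem.List.sorted l (fun it => it.2.2) false)).2
    = pvSweep 0 0 (PySem.List.sorted l (fun it => it.2.2) false)
  set s := PySem.List.sorted l (fun it => it.2.2) false with hs
  have hsn : (s.map Prod.fst).Nodup := by
    have hperm : s.Perm l := PySem.List.sorted_perm l (fun it => it.2.2) false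
    exact ((hperm.map Prod.fst).nodup_iff).mpr hpre
  rw [pvLoop_eq s hsn]
  show pvWhile (l.length + 2) (pvPass 0 0 false s).1 (pvPass 0 0 false s).2.2.2 = pvSweep 0 0 s
  cases hb : (pvPass 0 0 false s).2.2.2 with
  | false =>
    rw [pvWhile_false]
    have hf := pvPass_flag_false s 0 0 false le_rfl hb
    rw [hf.1]
    have h2 := hf.2
    rw [sub_zero] at h2
    exact h2.symm
  | true =>
    rw [show l.length + 2 = (l.length + 1) + 1 from rfl, pvWhile]
    have hk1 : (((pvPass 0 0 false s).1).map Prod.fst).Nodup := by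
      rw [pvPass_keys]; exact hsn
    have h2pass := pvPass_pass s 0 0 0 false false le_rfl le_rfl
    simp only [sub_zero] at h2pass
    rw [pvLoop_eq _ hk1]
    show pvWhile (l.length + 1) (pvPass 0 0 false (pvPass 0 0 false s).1).1
        (pvPass 0 0 false (pvPass 0 0 false s).1).2.2.2 = pvSweep 0 0 s
    rw [h2pass]
    cases hb2 : (pvPass 0 0 false (pvPass 0 0 false s).1).2.2.2 with
    | false => rw [pvWhile_false]
    | true =>
      rw [pvWhile]
      have hks : ((pvSweep 0 0 s).map Prod.fst).Nodup := by
        rw [pvSweep_keys]; exact hsn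
      rw [pvLoop_eq _ hks]
      show pvWhile l.length (pvPass 0 0 false (pvSweep 0 0 s)).1
          (pvPass 0 0 false (pvSweep 0 0 s)).2.2.2 = pvSweep 0 0 s
      have hfix := pvPass_sweep_fix s 0 0 false
      rw [hfix.1, hfix.2.2, pvWhile_false]
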